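-- pv_equiv track=rewrite | github.com/Trantry/Comparative_Genomics_of_Gerromorpha | Scripts/4_Synteny/rename_chromosome.py | build_all_mappings_from_whitespace_table
-- ===== SOURCE A (Python) =====
-- def build_all_mappings_from_whitespace_table(rows):
--     """
--     rows: list[list[str]]
--     Expect:
--       rows[0] -> header line (species names, possibly empty tokens)
--       rows[1] -> labels like original_id new_id original_id new_id ...
--       rows[2:] -> data rows
--     Return: (all_mappings_dict, detected_list)
--       all_mappings_dict: header_label -> {original: new}
--       detected_list: list of (col, col+1, header_label, n_pairs)
--     """
--     if len(rows) < 2: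
--         raise ValueError(
--             "Table mapping doit contenir au moins deux lignes (header+labels)"
--         )
--
--     header_tokens = rows[0]
--     label_tokens = rows[1]
--     ncols = max(len(header_tokens), len(label_tokens))
--     # pad tokens to ncols
--     header = header_tokens + [""] * (ncols - len(header_tokens))
--     labels = label_tokens + [""] * (ncols - len(label_tokens))
--
--     mappings = {}
--     detected = []
--     for c in range(ncols - 1):
--         lab_c = labels[c].lower() if c < len(labels) else ""
--         lab_c1 = labels[c + 1].lower() if (c + 1) < len(labels) else ""
--         if lab_c.startswith("original") and lab_c1.startswith("new"):
--             # determine header label: try header[c], then search left then right for nearest non-empty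
--             hdr = header[c] if c < len(header) else ""
--             if not hdr:
--                 # left
--                 for L in range(c - 1, -1, -1):
--                     if L < len(header) and header[L].strip():
--                         hdr = header[L].strip()
--                         break
--             if not hdr:
--                 for R in range(c + 1, ncols):
--                     if R < len(header) and header[R].strip():
--                         hdr = header[R].strip()
--                         break
--             header_label = hdr if hdr else f"col_{c}"
--             # build mapping from subsequent rows
--             mapping = {}
--             for r in range(2, len(rows)):
--                 row = rows[r]
--                 o = row[c].strip() if c < len(row) else ""
--                 n = row[c + 1].strip() if (c + 1) < len(row) else ""
--                 # ignore empty original ids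
--                 if o:
--                     mapping[o] = n
--             mappings.setdefault(header_label, {}).update(mapping)
--             detected.append((c, c + 1, header_label, len(mapping)))
--     return mappings, detected
-- ===== SOURCE B (Python) =====
-- def build_all_mappings_from_whitespace_table(rows):
--     if len(rows) < 2:
--         raise ValueError(
--             "Table mapping doit contenir au moins deux lignes (header+labels)"
--         )
--     header_tokens = rows[0]
--     label_tokens = rows[1]
--     ncols = max(len(header_tokens), len(label_tokens))
--     header = header_tokens + [""] * (ncols - len(header_tokens))
--     labels = label_tokens + [""] * (ncols - len(label_tokens))
--
--     # two linear passes: nearest earlier / nearest later non-blank header, stripped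
--     left_fill = []
--     last = None
--     for h in header:
--         left_fill.append(last)
--         t = h.strip()
--         if t:
--             last = t
--     right_rev = []
--     nxt = None
--     for h in reversed(header):
--         right_rev.append(nxt)
--         t = h.strip()
--         if t:
--             nxt = t
--     right_fill = right_rev[::-1]
--     resolved = [
--         header[c] or left_fill[c] or right_fill[c] or f"col_{c}"
--         for c in range(ncols)
--     ]
--
--     data = rows[2:]
--     mappings = {}
--     detected = []
--     for c in range(ncols - 1):
--         if labels[c].lower().startswith("original") and labels[c + 1].lower().startswith("new"):
--             pair = {}
--             for row in data:
--                 o = row[c].strip() if c < len(row) else ""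
--                 if o:
--                     pair[o] = row[c + 1].strip() if (c + 1) < len(row) else ""
--             mappings.setdefault(resolved[c], {}).update(pair)
--             detected.append((c, c + 1, resolved[c], len(pair)))
--     return mappings, detected
-- ===== Notes on version B (the rewrite author's own statement) =====
-- stated objective: alternative
-- what changed: A re-scans the header left and right inside the column loop for every detected pair; B precomputes nearest-nonblank fill tables in two linear passes, resolves every column label once up front, and iterates the sliced data rows directly instead of indexing rows by position.
import Mathlib
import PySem

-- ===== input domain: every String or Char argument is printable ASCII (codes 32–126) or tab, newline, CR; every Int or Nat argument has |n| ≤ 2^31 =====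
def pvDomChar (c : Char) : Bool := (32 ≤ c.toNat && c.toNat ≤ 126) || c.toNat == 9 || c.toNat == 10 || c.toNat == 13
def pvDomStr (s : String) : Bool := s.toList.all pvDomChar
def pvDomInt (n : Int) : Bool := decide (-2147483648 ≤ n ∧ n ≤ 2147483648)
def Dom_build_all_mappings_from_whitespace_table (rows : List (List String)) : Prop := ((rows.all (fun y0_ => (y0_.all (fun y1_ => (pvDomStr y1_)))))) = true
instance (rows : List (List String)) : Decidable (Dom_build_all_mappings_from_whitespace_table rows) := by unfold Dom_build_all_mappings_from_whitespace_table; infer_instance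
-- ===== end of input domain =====

-- ===== PORT A =====
-- B differs only in how it computes the same results: the return value is identical; neither mutates its argument.
-- A: literal transliteration. Left search: for L in range(c-1,-1,-1), first header[L].strip() truthy.
def aLeftSearch (header : List String) : Nat → String
  | 0 => ""
  | c + 1 =>
    let h := PySem.Str.strip (header.getD c "")
    if h ≠ "" then h else aLeftSearch header c

-- A: right search: for R in range(c+1, ncols), first header[R].strip() truthy.
def aRightSearch (header : List String) (ncols : Nat) (R : Nat) : String :=
  if _h : R < ncols then
    let h := PySem.Str.strip (header.getD R "")
    if h ≠ "" then h else aRightSearch header ncols (R + 1)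
  else ""
termination_by ncols - R

def build_all_mappings_from_whitespace_table (rows : List (List String)) : (List (String × List (String × String))) × (List (Int × Int × String × Int)) :=
  let header_tokens := rows.getD 0 []
  let label_tokens := rows.getD 1 []
  let ncols := max header_tokens.length label_tokens.length
  let header := header_tokens ++ List.replicate (ncols - header_tokens.length) ""
  let labels := label_tokens ++ List.replicate (ncols - label_tokens.length) ""
  let st := (List.range (ncols - 1)).foldl (fun (st : PySem.Dict String (PySem.Dict String String) × List (Int × Int × String × Int)) c =>
    let lab_c := PySem.Str.lower (labels.getD c "")
    let lab_c1 := PySem.Str.lower (labels.getD (c + 1) "")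
    if PySem.Str.startswith lab_c "original" && PySem.Str.startswith lab_c1 "new" then
      let hdr := header.getD c ""
      let hdr := if hdr = "" then aLeftSearch header c else hdr
      let hdr := if hdr = "" then aRightSearch header ncols (c + 1) else hdr
      let header_label := if hdr = "" then "col_" ++ PySem.Int.toStr (c : Int) else hdr
      let mapping := (List.range' 2 (rows.length - 2)).foldl (fun (m : PySem.Dict String String) r =>
        let row := rows.getD r []
        let o := if c < row.length then PySem.Str.strip (row.getD c "") else ""
        let n := if c + 1 < row.length then PySem.Str.strip (row.getD (c + 1) "") else ""
        if o ≠ "" then m.insert o n else m) PySem.Dict.empty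
      let merged := PySem.Dict.update (st.1.getD header_label PySem.Dict.empty) mapping.items
      (st.1.insert header_label merged, st.2 ++ [((c : Int), (c : Int) + 1, header_label, (mapping.size : Int))])
    else st) (PySem.Dict.empty, [])
  (st.1.items.map (fun p => (p.1, p.2.items)), st.2)

-- ===== PORT B =====
-- B: forward pass: for h in header, record `last` then update it with h.strip() when truthy.
def bLeftFill (header : List String) : List (Option String) :=
  (header.foldl (fun (st : List (Option String) × Option String) h =>
      let t := PySem.Str.strip h
      (st.1 ++ [st.2], if t ≠ "" then some t else st.2)) ([], none)).1

-- B: backward pass over reversed header, then reverse the collected list.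
def bRightFill (header : List String) : List (Option String) :=
  ((header.reverse.foldl (fun (st : List (Option String) × Option String) h =>
      let t := PySem.Str.strip h
      (st.1 ++ [st.2], if t ≠ "" then some t else st.2)) ([], none)).1).reverse

-- B: header[c] or left_fill[c] or right_fill[c] or f"col_{c}"
def bResolve (h : String) (lf rf : Option String) (c : Nat) : String :=
  if h ≠ "" then h
  else match lf with
    | some s => s
    | none =>
      match rf with
      | some s => s
      | none => "col_" ++ PySem.Int.toStr (c : Int)

def build_all_mappings_from_whitespace_table_alt (rows : List (List String)) : (List (String × List (String × String))) × (List (Int × Int × String × Int)) :=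
  let header_tokens := rows.getD 0 []
  let label_tokens := rows.getD 1 []
  let ncols := max header_tokens.length label_tokens.length
  let header := header_tokens ++ List.replicate (ncols - header_tokens.length) ""
  let labels := label_tokens ++ List.replicate (ncols - label_tokens.length) ""
  let left_fill := bLeftFill header
  let right_fill := bRightFill header
  let resolved := (List.range ncols).map (fun c =>
    bResolve (header.getD c "") (left_fill.getD c none) (right_fill.getD c none) c)
  let data := rows.drop 2
  let st := (List.range (ncols - 1)).foldl (fun (st : PySem.Dict String (PySem.Dict String String) × List (Int × Int × String × Int)) c =>
    if PySem.Str.startswith (PySem.Str.lower (labels.getD c "")) "original" &&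
       PySem.Str.startswith (PySem.Str.lower (labels.getD (c + 1) "")) "new" then
      let label := resolved.getD c ""
      let pair := data.foldl (fun (m : PySem.Dict String String) row =>
        let o := if c < row.length then PySem.Str.strip (row.getD c "") else ""
        if o ≠ "" then m.insert o (if c + 1 < row.length then PySem.Str.strip (row.getD (c + 1) "") else "") else m) PySem.Dict.empty
      let merged := PySem.Dict.update (st.1.getD label PySem.Dict.empty) pair.items
      (st.1.insert label merged, st.2 ++ [((c : Int), (c : Int) + 1, label, (pair.size : Int))])
    else st) (PySem.Dict.empty, [])
  (st.1.items.map (fun p => (p.1, p.2.items)), st.2)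

-- ===== PRECONDITION & SPEC =====
-- Pre_ excludes exactly the inputs with fewer than two rows, on which A raises ValueError.
def Pre_build_all_mappings_from_whitespace_table (rows : List (List String)) : Prop := 2 ≤ rows.length
instance (rows : List (List String)) : Decidable (Pre_build_all_mappings_from_whitespace_table rows) := by unfold Pre_build_all_mappings_from_whitespace_table; infer_instance
def pvWitness_build_all_mappings_from_whitespace_table : List (List String) := [["sp1", ""], ["original_id", "new_id"], ["a", "b"]]
def Spec_build_all_mappings_from_whitespace_table (rows : List (List String)) (out : (List (String × List (String × String))) × (List (Int × Int × String × Int))) : Prop := out = build_all_mappings_from_whitespace_table_alt rows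
instance (rows : List (List String)) (out : (List (String × List (String × String))) × (List (Int × Int × String × Int))) : Decidable (Spec_build_all_mappings_from_whitespace_table rows out) := by unfold Spec_build_all_mappings_from_whitespace_table; infer_instance

-- ===== CLAIM (what is proved, stated in full; the proofs are below) =====
def Claim_equal_build_all_mappings_from_whitespace_table : Prop := ∀ (rows : List (List String)), Dom_build_all_mappings_from_whitespace_table rows → Pre_build_all_mappings_from_whitespace_table rows → Spec_build_all_mappings_from_whitespace_table rows (build_all_mappings_from_whitespace_table rows)

-- ===== LEMMAS AND PROOFS =====

-- step function of B's fill passes, value part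
def stepOpt (acc : Option String) (h : String) : Option String :=
  if PySem.Str.strip h ≠ "" then some (PySem.Str.strip h) else acc

-- last truthy stripped value of a list (what B's `last` accumulator holds)
def lastTFrom (l : List String) (init : Option String) : Option String :=
  l.foldl stepOpt init

def lastT (l : List String) : Option String := lastTFrom l none

-- first truthy stripped value of a list
def firstT : List String → Option String
  | [] => none
  | h :: t => if PySem.Str.strip h ≠ "" then some (PySem.Str.strip h) else firstT t

theorem lastTFrom_or (l : List String) (init : Option String) :
    lastTFrom l init = (lastT l).or init := by
  induction l generalizing init with
  | nil => simp [lastTFrom, lastT]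
  | cons h t ih =>
    show lastTFrom t (stepOpt init h) = _
    rw [ih]
    have h2 : lastT (h :: t) = (lastT t).or (stepOpt none h) := by
      show lastTFrom t (stepOpt none h) = _
      rw [ih]
    rw [h2]
    cases lastT t with
    | some s => simp [Option.or]
    | none =>
      simp only [Option.or]
      unfold stepOpt
      by_cases hx : PySem.Str.strip h = "" <;> simp [hx]

theorem lastTFrom_ne_empty (l : List String) (init : Option String)
    (hinit : ∀ v, init = some v → v ≠ "") (s : String) (h : lastTFrom l init = some s) : s ≠ "" := by
  induction l generalizing init with
  | nil => exact hinit s h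
  | cons x t ih =>
    refine ih (stepOpt init x) ?_ h
    intro v hv
    unfold stepOpt at hv
    split at hv
    · rename_i hne; cases hv; simpa using hne
    · exact hinit v hv

theorem lastT_ne_empty (l : List String) (s : String) (h : lastT l = some s) : s ≠ "" :=
  lastTFrom_ne_empty l none (by simp) s h

theorem firstT_ne_empty (l : List String) (s : String) (h : firstT l = some s) : s ≠ "" := by
  induction l with
  | nil => simp [firstT] at h
  | cons x t ih =>
    by_cases hx : PySem.Str.strip x = ""
    · rw [show firstT (x :: t) = firstT t by simp [firstT, hx]] at h
      exact ih h
    · rw [show firstT (x :: t) = some (PySem.Str.strip x) by simp [firstT, hx]] at h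
      cases h; exact hx

theorem firstT_append (a b : List String) : firstT (a ++ b) = (firstT a).or (firstT b) := by
  induction a with
  | nil => simp [firstT]
  | cons x t ih =>
    simp only [List.cons_append, firstT, ih]
    split <;> simp [Option.or]

theorem firstT_reverse (l : List String) : firstT l.reverse = lastT l := by
  induction l with
  | nil => rfl
  | cons h t ih =>
    have : lastT (h :: t) = (lastT t).or (stepOpt none h) := lastTFrom_or t (stepOpt none h)
    rw [this, List.reverse_cons, firstT_append, ih]
    rfl

-- the fill fold: the collected list is the table of prefix `last` values
theorem fill_fold_fst (l : List String) (acc : List (Option String)) (init : Option String) :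
    (l.foldl (fun (st : List (Option String) × Option String) h =>
      (st.1 ++ [st.2], if PySem.Str.strip h ≠ "" then some (PySem.Str.strip h) else st.2)) (acc, init)).1
    = acc ++ (List.range l.length).map (fun i => lastTFrom (l.take i) init) := by
  induction l generalizing acc init with
  | nil => simp
  | cons h t ih =>
    simp only [List.foldl_cons]
    rw [ih]
    rw [List.length_cons, List.range_succ_eq_map, List.map_cons, List.map_map]
    have hmap : List.map ((fun i => lastTFrom (List.take i (h :: t)) init) ∘ Nat.succ) (List.range t.length)
        = List.map (fun i => lastTFrom (List.take i t)
            (if PySem.Str.strip h ≠ "" then some (PySem.Str.strip h) else init)) (List.range t.length) := by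
      apply List.map_congr_left
      intro i _
      simp [Function.comp, List.take_succ_cons, lastTFrom, List.foldl_cons, stepOpt]
    rw [hmap]
    simp [lastTFrom, List.append_assoc]

theorem bLeftFill_eq (header : List String) :
    bLeftFill header = (List.range header.length).map (fun i => lastT (header.take i)) := by
  unfold bLeftFill
  rw [fill_fold_fst]
  simp [lastT]

theorem bRightFill_eq (header : List String) :
    bRightFill header = ((List.range header.length).map
      (fun i => lastT (header.reverse.take i))).reverse := by
  unfold bRightFill
  rw [fill_fold_fst]
  simp [lastT]

theorem aLeftSearch_eq (header : List String) (c : Nat) (hc : c ≤ header.length) :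
    aLeftSearch header c = (lastT (header.take c)).getD "" := by
  induction c with
  | zero => simp [aLeftSearch, lastT, lastTFrom]
  | succ c ih =>
    have hc' : c < header.length := hc
    have htake : header.take (c + 1) = header.take c ++ [header.getD c ""] := by
      rw [List.take_succ]
      congr 1
      simp [List.getD, List.getElem?_eq_getElem hc']
    rw [htake]
    have hstep : lastT (header.take c ++ [header.getD c ""]) =
        stepOpt (lastT (header.take c)) (header.getD c "") := by
      simp [lastT, lastTFrom]
    rw [hstep]
    simp only [aLeftSearch, stepOpt, List.getD]
    by_cases hx : PySem.Str.strip (header[c]?.getD "") = ""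
    · have hih := ih (Nat.le_of_lt hc')
      simp [hx, hih, lastT]
    · simp [hx]

theorem aRightSearch_eq_fuel (header : List String) (n : Nat) (fuel : Nat) :
    ∀ R, n - R ≤ fuel → header.length = n →
      aRightSearch header n R = (firstT (header.drop R)).getD "" := by
  induction fuel with
  | zero =>
    intro R hfuel hn
    have hR : ¬ R < n := by omega
    unfold aRightSearch
    rw [dif_neg hR]
    rw [List.drop_eq_nil_of_le (by omega)]
    simp [firstT]
  | succ fuel ih =>
    intro R hfuel hn
    by_cases hR : R < n
    · have hR' : R < header.length := by omega
      unfold aRightSearch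
      rw [dif_pos hR]
      rw [List.drop_eq_getElem_cons hR']
      have hgd : header.getD R "" = header[R] := by
        simp [List.getD, List.getElem?_eq_getElem hR']
      have hgd2 : header[R]?.getD "" = header[R] := by
        simp [List.getElem?_eq_getElem hR']
      by_cases hx : PySem.Str.strip header[R] = ""
      · simp [firstT, hgd2, hx, ih (R + 1) (by omega) hn]
      · simp [firstT, hgd2, hx]
    · unfold aRightSearch
      rw [dif_neg hR]
      rw [List.drop_eq_nil_of_le (by omega)]
      simp [firstT]

theorem aRightSearch_eq (header : List String) (n R : Nat) (hn : header.length = n) :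
    aRightSearch header n R = (firstT (header.drop R)).getD "" :=
  aRightSearch_eq_fuel header n (n - R) R (le_refl _) hn

-- B's fills, looked up at a column
theorem bLeftFill_getD (header : List String) (c : Nat) (hc : c < header.length) :
    (bLeftFill header).getD c none = lastT (header.take c) := by
  rw [bLeftFill_eq]
  rw [List.getD, List.getElem?_eq_getElem (by simpa using hc)]
  simp

theorem bRightFill_getD (header : List String) (c : Nat) (hc : c < header.length) :
    (bRightFill header).getD c none = firstT (header.drop (c + 1)) := by
  rw [bRightFill_eq]
  have hlen : ((List.range header.length).map
      (fun i => lastT (header.reverse.take i))).length = header.length := by simp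
  rw [List.getD, List.getElem?_reverse (by simpa [hlen] using hc)]
  rw [hlen]
  rw [List.getElem?_eq_getElem (by simp; omega)]
  simp only [List.getElem_map, List.getElem_range, Option.getD_some]
  have htake : header.reverse.take (header.length - 1 - c) = (header.drop (c + 1)).reverse := by
    rw [List.take_reverse]
    congr 2
    omega
  rw [htake, ← firstT_reverse, List.reverse_reverse]

-- label resolution agreement, per column (statement in the zeta-reduced shape of port A's code)
theorem resolve_eq (header : List String) (n c : Nat) (hn : header.length = n)
    (hc : c < header.length) :
    (if (if (if header.getD c "" = "" then aLeftSearch header c else header.getD c "") = ""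
          then aRightSearch header n (c + 1)
          else if header.getD c "" = "" then aLeftSearch header c else header.getD c "") = ""
      then "col_" ++ PySem.Int.toStr (c : Int)
      else if (if header.getD c "" = "" then aLeftSearch header c else header.getD c "") = ""
          then aRightSearch header n (c + 1)
          else if header.getD c "" = "" then aLeftSearch header c else header.getD c "")
    = bResolve (header.getD c "") (lastT (header.take c)) (firstT (header.drop (c + 1))) c := by
  subst hn
  simp only [bResolve]
  by_cases h0 : header.getD c "" = ""
  · simp only [h0, ite_not]
    rw [aLeftSearch_eq header c (Nat.le_of_lt hc)]
    cases hl : lastT (header.take c) with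
    | some s =>
      have hs := lastT_ne_empty _ _ hl
      simp [hs]
    | none =>
      simp only [Option.getD_none]
      rw [aRightSearch_eq header header.length (c + 1) rfl]
      cases hr : firstT (header.drop (c + 1)) with
      | some s =>
        have hs := firstT_ne_empty _ _ hr
        simp [hs]
      | none => simp
  · simp only [List.getD] at h0
    simp [h0]

-- range'-indexed loop over rows = loop over the dropped list
theorem range'_getD_map {α : Type} (l : List α) (k : Nat) (d : α) (hk : k ≤ l.length) :
    (List.range' k (l.length - k)).map (fun r => l.getD r d) = l.drop k := by
  apply List.ext_getElem
  · simp
  · intro i h1 h2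
    simp only [List.getElem_map, List.getElem_range', List.getElem_drop]
    have : k + i < l.length := by simp at h2; omega
    simp [List.getD, List.getElem?_eq_getElem this]


-- ===== VERDICT (by name: the statement is the Claim_ definition above) =====
theorem build_all_mappings_from_whitespace_table_spec : Claim_equal_build_all_mappings_from_whitespace_table := by
  intro rows _hdom hpre
  have hpre' : 2 ≤ rows.length := hpre
  show build_all_mappings_from_whitespace_table rows = build_all_mappings_from_whitespace_table_alt rows
  unfold build_all_mappings_from_whitespace_table build_all_mappings_from_whitespace_table_alt
  dsimp only
  set ncols := max (rows.getD 0 []).length (rows.getD 1 []).length with hncols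
  set header := rows.getD 0 [] ++ List.replicate (ncols - (rows.getD 0 []).length) "" with hheader
  set labels := rows.getD 1 [] ++ List.replicate (ncols - (rows.getD 1 []).length) "" with hlabels
  have hlen : header.length = ncols := by
    rw [hheader]
    simp only [List.length_append, List.length_replicate]
    have : (rows.getD 0 []).length ≤ ncols := le_max_left _ _
    omega
  refine congrArg (fun st : PySem.Dict String (PySem.Dict String String) × List (Int × Int × String × Int) =>
    (st.1.items.map (fun p => (p.1, p.2.items)), st.2)) ?_
  apply PySem.List.foldl_congr_mem
  intro st c hc
  have hc' : c < header.length := by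
    rw [hlen]
    have := List.mem_range.mp hc
    omega
  rcases Bool.eq_false_or_eq_true
      (PySem.Str.startswith (PySem.Str.lower (labels.getD c "")) "original" &&
       PySem.Str.startswith (PySem.Str.lower (labels.getD (c + 1) "")) "new") with hb | hb
  case inr =>
    rw [if_neg (by rw [hb]; exact Bool.false_ne_true), if_neg (by rw [hb]; exact Bool.false_ne_true)]
  case inl =>
    rw [if_pos hb, if_pos hb]
    have hmap :
        (List.range' 2 (rows.length - 2)).foldl (fun (m : PySem.Dict String String) r =>
          if (if c < (rows.getD r []).length then PySem.Str.strip ((rows.getD r []).getD c "") else "") ≠ ""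
          then m.insert (if c < (rows.getD r []).length then PySem.Str.strip ((rows.getD r []).getD c "") else "")
                 (if c + 1 < (rows.getD r []).length then PySem.Str.strip ((rows.getD r []).getD (c + 1) "") else "")
          else m) PySem.Dict.empty
        = (rows.drop 2).foldl (fun (m : PySem.Dict String String) row =>
          if (if c < row.length then PySem.Str.strip (row.getD c "") else "") ≠ ""
          then m.insert (if c < row.length then PySem.Str.strip (row.getD c "") else "")
                 (if c + 1 < row.length then PySem.Str.strip (row.getD (c + 1) "") else "")
          else m) PySem.Dict.empty := by
      rw [← range'_getD_map rows 2 [] hpre', List.foldl_map]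
    have hres :
        ((List.range ncols).map (fun c =>
          bResolve (header.getD c "") ((bLeftFill header).getD c none) ((bRightFill header).getD c none) c)).getD c ""
        = bResolve (header.getD c "") (lastT (header.take c)) (firstT (header.drop (c + 1))) c := by
      have hcn : c < ncols := hlen ▸ hc'
      rw [List.getD, List.getElem?_eq_getElem (by simpa using hcn)]
      simp only [List.getElem_map, List.getElem_range, Option.getD_some]
      rw [bLeftFill_getD header c hc', bRightFill_getD header c hc']
    rw [hres, hmap, resolve_eq header ncols c hlen hc']
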